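-- pv_equiv track=rewrite | github.com/KIMHYUNSOO1999/BOJ_Algorithm | 프로그래머스/lv0/120814. 피자 나눠 먹기 （1）/피자 나눠 먹기 （1）.py | solution
-- ===== SOURCE A (Python) =====
-- def solution(n):
--
--     answer=1
--
--     while True:
--         if n>answer*7:
--             answer+=1
--         else:
--             break
--
--     return answer
-- ===== SOURCE B (Python) =====
-- def solution(n):
--     return max(1, (n + 6) // 7)
-- ===== Notes on version B (the rewrite author's own statement) =====
-- stated objective: simpler
-- what changed: Replaces the unbounded incrementing while-loop with the closed-form ceiling division max(1, (n+6)//7).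
import Mathlib
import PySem

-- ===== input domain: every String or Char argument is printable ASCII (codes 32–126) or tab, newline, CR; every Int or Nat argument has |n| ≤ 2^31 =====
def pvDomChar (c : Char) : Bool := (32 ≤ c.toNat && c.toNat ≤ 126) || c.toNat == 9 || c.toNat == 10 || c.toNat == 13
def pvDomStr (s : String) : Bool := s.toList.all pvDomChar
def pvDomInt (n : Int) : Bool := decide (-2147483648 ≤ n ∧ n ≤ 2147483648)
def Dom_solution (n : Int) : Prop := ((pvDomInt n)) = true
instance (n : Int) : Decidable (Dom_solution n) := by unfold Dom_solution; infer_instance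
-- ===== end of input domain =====

-- B replaces A's unbounded incrementing while-loop by the closed form max(1, (n+6)//7) (simpler, no loop).


-- ===== PORT A =====
-- the 'while True' loop: increments answer while n > answer*7
def solutionLoop (n answer : Int) : Int :=
  if n > answer * 7 then solutionLoop n (answer + 1) else answer
termination_by (n - answer * 7).toNat
decreasing_by omega

def solution (n : Int) : Int := solutionLoop n 1

-- ===== PORT B =====
def solution_alt (n : Int) : Int := max 1 (PySem.Int.floordiv (n + 6) 7)

-- ===== PRECONDITION & SPEC =====
def Spec_solution (n : Int) (out : Int) : Prop := out = solution_alt n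
instance (n : Int) (out : Int) : Decidable (Spec_solution n out) := by unfold Spec_solution; infer_instance

-- ===== CLAIM (what is proved, stated in full; the proofs are below) =====
def Claim_equal_solution : Prop := ∀ (n : Int), Dom_solution n → Spec_solution n (solution n)

-- ===== LEMMAS AND PROOFS =====

-- loop invariant: starting from any 1 ≤ a ≤ max 1 ⌈n/7⌉, the loop lands on max 1 ⌈n/7⌉
theorem solutionLoop_eq (n a : Int) (h1 : 1 ≤ a)
    (h2 : a ≤ max 1 (PySem.Int.floordiv (n + 6) 7)) :
    solutionLoop n a = max 1 (PySem.Int.floordiv (n + 6) 7) := by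
  have hfd : PySem.Int.floordiv (n + 6) 7 = (n + 6) / 7 :=
    PySem.Int.floordiv_eq_ediv_of_pos (by omega)
  rw [hfd] at h2 ⊢
  unfold solutionLoop
  split
  · rename_i hlt
    have := solutionLoop_eq n (a + 1) (by omega) (by omega)
    rw [hfd] at this
    exact this
  · rename_i hge
    omega
termination_by (n - a * 7).toNat
decreasing_by omega

-- ===== VERDICT (by name: the statement is the Claim_ definition above) =====
theorem solution_spec : Claim_equal_solution := by
  intro n _
  unfold Spec_solution solution solution_alt
  have hfd : PySem.Int.floordiv (n + 6) 7 = (n + 6) / 7 :=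
    PySem.Int.floordiv_eq_ediv_of_pos (by omega)
  exact solutionLoop_eq n 1 le_rfl (by rw [hfd]; omega)
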